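-- pv_equiv track=rewrite | github.com/chaebum-kim/algorithm-problems | string/string01.py | is_equal_optimal
-- ===== SOURCE A (Python) =====
-- def is_equal_optimal(s: str, t: str) -> bool:
--
--     p1, p2 = len(s)-1, len(t)-1
--     while p1 >= 0 or p2 >= 0:
--         while p1 >= 0 and s[p1] == '#':
--             skip = 1
--             p1 -= 1
--             while p1 >= 0 and skip > 0:
--                 if s[p1] == '#':
--                     skip += 1
--                 else:
--                     skip -= 1
--                 p1 -= 1
--         while p2 >= 0 and t[p2] == '#':
--             skip = 1
--             p2 -= 1
--             while p2 >= 0 and skip > 0: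
--                 if t[p2] == '#':
--                     skip += 1
--                 else:
--                     skip -= 1
--                 p2 -= 1
--
--         if p1 >= 0 and p2 >= 0:
--             if s[p1] != t[p2]:
--                 return False
--         elif (p1 >= 0 and p2 < 0) or (p1 < 0 and p2 >= 0):
--             return False
--         p1 -= 1
--         p2 -= 1
--
--     return True
-- ===== SOURCE B (Python) =====
-- def _process(x: str) -> list:
--     st = []
--     for c in x:
--         if c == '#':
--             if st:
--                 st.pop()
--         else:
--             st.append(c)
--     return st
--
--
-- def is_equal_optimal(s: str, t: str) -> bool:
--     return _process(s) == _process(t)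
-- ===== Notes on version B (the rewrite author's own statement) =====
-- stated objective: simpler
-- what changed: Replaced A's backward two-pointer walk with nested skip-counting loops by a forward stack build of each processed string followed by a single list comparison.
import Mathlib
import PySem

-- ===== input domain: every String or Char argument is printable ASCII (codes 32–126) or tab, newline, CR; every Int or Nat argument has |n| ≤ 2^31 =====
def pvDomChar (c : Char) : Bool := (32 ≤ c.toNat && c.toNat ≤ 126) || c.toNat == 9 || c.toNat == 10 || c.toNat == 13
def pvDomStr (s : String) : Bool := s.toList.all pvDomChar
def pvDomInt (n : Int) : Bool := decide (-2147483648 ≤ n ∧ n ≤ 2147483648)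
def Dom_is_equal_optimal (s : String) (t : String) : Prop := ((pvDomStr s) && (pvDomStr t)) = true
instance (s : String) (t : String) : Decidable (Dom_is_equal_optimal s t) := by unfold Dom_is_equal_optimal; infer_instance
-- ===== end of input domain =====

-- B replaces A's backward two-pointer skip-count walk by a forward stack build of each
-- processed string and a single comparison (objective: simpler; same asymptotic cost).

-- ===== PORT A =====
-- Loops are ported with a fuel argument (structural recursion); the fuel supplied at each
-- call site is enough for the loop to run to completion, so it is purely a totality guard.

-- A's innermost loop: 'while p >= 0 and skip > 0: …'
def pvSkipA (cs : List Char) : Nat → Int → Int → Int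
  | 0, p, _ => p
  | fuel + 1, p, skip =>
    if p ≥ 0 ∧ skip > 0 then
      if PySem.List.pyGet? cs p = some '#' then pvSkipA cs fuel (p - 1) (skip + 1)
      else pvSkipA cs fuel (p - 1) (skip - 1)
    else p

-- A's loop 'while p >= 0 and s[p] == "#": skip = 1; p -= 1; <inner loop>'
def pvBackA (cs : List Char) : Nat → Int → Int
  | 0, p => p
  | fuel + 1, p =>
    if p ≥ 0 ∧ PySem.List.pyGet? cs p = some '#' then
      pvBackA cs fuel (pvSkipA cs p.toNat (p - 1) 1)
    else p

-- A's outer loop 'while p1 >= 0 or p2 >= 0: …'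
def pvLoopA (cs ct : List Char) : Nat → Int → Int → Bool
  | 0, _, _ => true
  | fuel + 1, p1, p2 =>
    if p1 ≥ 0 ∨ p2 ≥ 0 then
      let q1 := pvBackA cs (p1 + 1).toNat p1
      let q2 := pvBackA ct (p2 + 1).toNat p2
      if q1 ≥ 0 ∧ q2 ≥ 0 then
        if PySem.List.pyGet? cs q1 ≠ PySem.List.pyGet? ct q2 then false
        else pvLoopA cs ct fuel (q1 - 1) (q2 - 1)
      else if (q1 ≥ 0 ∧ q2 < 0) ∨ (q1 < 0 ∧ q2 ≥ 0) then false
      else pvLoopA cs ct fuel (q1 - 1) (q2 - 1)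
    else true

def is_equal_optimal (s : String) (t : String) : Bool :=
  pvLoopA s.toList t.toList (s.toList.length + t.toList.length + 1)
    ((s.toList.length : Int) - 1) ((t.toList.length : Int) - 1)

-- ===== PORT B =====
-- forward pass: push a non-'#' char, on '#' pop if the stack is nonempty
def pvProcB (cs : List Char) : List Char :=
  cs.foldl (fun st c => if c = '#' then (if st.isEmpty then st else st.dropLast) else st ++ [c]) []

def is_equal_optimal_alt (s : String) (t : String) : Bool :=
  pvProcB s.toList == pvProcB t.toList

-- ===== PRECONDITION & SPEC =====
def Spec_is_equal_optimal (s : String) (t : String) (out : Bool) : Prop := out = is_equal_optimal_alt s t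
instance (s : String) (t : String) (out : Bool) : Decidable (Spec_is_equal_optimal s t out) := by unfold Spec_is_equal_optimal; infer_instance

-- ===== CLAIM (what is proved, stated in full; the proofs are below) =====
def Claim_equal_is_equal_optimal : Prop := ∀ (s : String) (t : String), Dom_is_equal_optimal s t → Spec_is_equal_optimal s t (is_equal_optimal s t)

-- ===== LEMMAS AND PROOFS =====

theorem pvSkipA_le (cs : List Char) (fuel : Nat) : ∀ (p skip : Int), pvSkipA cs fuel p skip ≤ p := by
  induction fuel with
  | zero => intro p skip; simp [pvSkipA]
  | succ fuel ih =>
      intro p skip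
      rw [pvSkipA]
      split
      · split
        · have := ih (p - 1) (skip + 1); omega
        · have := ih (p - 1) (skip - 1); omega
      · omega

theorem pvBackA_le (cs : List Char) (fuel : Nat) : ∀ (p : Int), pvBackA cs fuel p ≤ p := by
  induction fuel with
  | zero => intro p; simp [pvBackA]
  | succ fuel ih =>
      intro p
      rw [pvBackA]
      split
      · have h1 := ih (pvSkipA cs p.toNat (p - 1) 1)
        have h2 := pvSkipA_le cs p.toNat (p - 1) 1
        omega
      · omega

theorem pvDL_nil (n : Nat) : List.dropLast^[n] ([] : List Char) = [] := by
  induction n with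
  | zero => rfl
  | succ n ih => rw [Function.iterate_succ_apply, List.dropLast_nil, ih]

theorem pvIf_isEmpty (st : List Char) : (if st.isEmpty then st else st.dropLast) = st.dropLast := by
  cases st <;> simp

theorem pvProcB_append (cs : List Char) (c : Char) :
    pvProcB (cs ++ [c]) =
      (if c = '#' then (pvProcB cs).dropLast else pvProcB cs ++ [c]) := by
  rw [pvProcB, List.foldl_append]
  show (if c = '#' then (if (pvProcB cs).isEmpty then pvProcB cs else (pvProcB cs).dropLast)
        else pvProcB cs ++ [c]) = _
  by_cases hc : c = '#'
  · rw [if_pos hc, if_pos hc, pvIf_isEmpty]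
  · rw [if_neg hc, if_neg hc]

-- the processed prefix up to pointer p (inclusive)
def pvP (cs : List Char) (p : Int) : List Char := pvProcB (cs.take (p + 1).toNat)

theorem pvP_neg (cs : List Char) (p : Int) (hp : p < 0) : pvP cs p = [] := by
  have : (p + 1).toNat = 0 := by omega
  simp [pvP, this, pvProcB]

theorem pvP_take (cs : List Char) (p : Int) (h0 : 0 ≤ p) (hl : p < (cs.length : Int)) :
    ∃ c, PySem.List.pyGet? cs p = some c ∧
      pvP cs p = (if c = '#' then (pvP cs (p - 1)).dropLast else pvP cs (p - 1) ++ [c]) := by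
  have hn : p.toNat < cs.length := by omega
  refine ⟨cs[p.toNat], ?_, ?_⟩
  · rw [PySem.List.pyGet?_of_nonneg cs h0]
    simp [List.getElem?_eq_getElem hn]
  · have h1 : (p + 1).toNat = p.toNat + 1 := by omega
    have h2 : (p - 1 + 1).toNat = p.toNat := by omega
    rw [pvP, pvP, h1, h2, List.take_succ, List.getElem?_eq_getElem hn]
    simp only [Option.toList_some]
    exact pvProcB_append _ _

theorem pvSkipA_spec (cs : List Char) (fuel : Nat) : ∀ (p k : Int), 0 ≤ k →
    p < (cs.length : Int) → (p + 1).toNat ≤ fuel →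
    pvP cs (pvSkipA cs fuel p k) = List.dropLast^[k.toNat] (pvP cs p) := by
  induction fuel with
  | zero =>
      intro p k hk hl hf
      have hp : p < 0 := by omega
      rw [pvSkipA, pvP_neg cs p hp, pvDL_nil]
  | succ fuel ih =>
      intro p k hk hl hf
      rw [pvSkipA]
      by_cases h : p ≥ 0 ∧ k > 0
      · rw [if_pos h]
        obtain ⟨c, hg, hP⟩ := pvP_take cs p h.1 hl
        by_cases hc : PySem.List.pyGet? cs p = some '#'
        · rw [if_pos hc]
          have hcc : c = '#' := by rw [hg] at hc; exact Option.some.inj hc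
          rw [ih (p - 1) (k + 1) (by omega) (by omega) (by omega)]
          have hk1 : (k + 1).toNat = k.toNat + 1 := by omega
          rw [hP, hk1, if_pos hcc, ← Function.iterate_succ_apply]
        · rw [if_neg hc]
          have hcc : ¬ c = '#' := by rw [hg] at hc; intro hh; exact hc (by rw [hh])
          rw [ih (p - 1) (k - 1) (by omega) (by omega) (by omega)]
          have hk1 : k.toNat = (k - 1).toNat + 1 := by omega
          rw [hP, if_neg hcc, hk1, Function.iterate_succ_apply, List.dropLast_concat]
      · rw [if_neg h]
        rcases (by omega : k = 0 ∨ p < 0) with hk0 | hp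
        · simp [hk0]
        · rw [pvP_neg cs p hp, pvDL_nil]

theorem pvBackA_spec (cs : List Char) (fuel : Nat) : ∀ (p : Int),
    p < (cs.length : Int) → (p + 1).toNat ≤ fuel →
    pvP cs (pvBackA cs fuel p) = pvP cs p := by
  induction fuel with
  | zero => intro p _ _; rw [pvBackA]
  | succ fuel ih =>
      intro p hl hf
      rw [pvBackA]
      by_cases h : p ≥ 0 ∧ PySem.List.pyGet? cs p = some '#'
      · rw [if_pos h]
        have hle := pvSkipA_le cs p.toNat (p - 1) 1
        rw [ih _ (by omega) (by omega),
            pvSkipA_spec cs p.toNat (p - 1) 1 (by omega) (by omega) (by omega)]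
        obtain ⟨c, hg, hP⟩ := pvP_take cs p h.1 hl
        have hcc : c = '#' := by rw [hg] at h; exact Option.some.inj h.2
        rw [hP, if_pos hcc]; simp
      · rw [if_neg h]

theorem pvBackA_not_hash (cs : List Char) (fuel : Nat) : ∀ (p : Int), (p + 1).toNat ≤ fuel →
    pvBackA cs fuel p < 0 ∨ ¬ PySem.List.pyGet? cs (pvBackA cs fuel p) = some '#' := by
  induction fuel with
  | zero => intro p hf; rw [pvBackA]; left; omega
  | succ fuel ih =>
      intro p hf
      rw [pvBackA]
      by_cases h : p ≥ 0 ∧ PySem.List.pyGet? cs p = some '#'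
      · rw [if_pos h]
        have hle := pvSkipA_le cs p.toNat (p - 1) 1
        exact ih _ (by omega)
      · rw [if_neg h]
        by_cases hp : p < 0
        · exact Or.inl hp
        · right; intro hc; exact h ⟨by omega, hc⟩

theorem pvLoopA_spec (cs ct : List Char) (fuel : Nat) : ∀ (p1 p2 : Int),
    p1 < (cs.length : Int) → p2 < (ct.length : Int) →
    (p1 + 1).toNat + (p2 + 1).toNat < fuel →
    pvLoopA cs ct fuel p1 p2 = (pvP cs p1 == pvP ct p2) := by
  induction fuel with
  | zero => intro p1 p2 _ _ hf; omega
  | succ fuel ih =>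
      intro p1 p2 h1 h2 hf
      rw [pvLoopA]
      by_cases h : p1 ≥ 0 ∨ p2 ≥ 0
      · rw [if_pos h]
        have hb1 := pvBackA_le cs (p1 + 1).toNat p1
        have hb2 := pvBackA_le ct (p2 + 1).toNat p2
        have hs1 := pvBackA_spec cs (p1 + 1).toNat p1 h1 (by omega)
        have hs2 := pvBackA_spec ct (p2 + 1).toNat p2 h2 (by omega)
        have hn1 := pvBackA_not_hash cs (p1 + 1).toNat p1 (by omega)
        have hn2 := pvBackA_not_hash ct (p2 + 1).toNat p2 (by omega)
        set q1 := pvBackA cs (p1 + 1).toNat p1 with hq1def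
        set q2 := pvBackA ct (p2 + 1).toNat p2 with hq2def
        by_cases hq : q1 ≥ 0 ∧ q2 ≥ 0
        · rw [if_pos hq]
          obtain ⟨c1, hg1, hP1⟩ := pvP_take cs q1 hq.1 (by omega)
          obtain ⟨c2, hg2, hP2⟩ := pvP_take ct q2 hq.2 (by omega)
          have hc1 : ¬ c1 = '#' := by
            rcases hn1 with hn | hn
            · omega
            · intro he; exact hn (by rw [hg1, he])
          have hc2 : ¬ c2 = '#' := by
            rcases hn2 with hn | hn
            · omega
            · intro he; exact hn (by rw [hg2, he])
          have e1 : pvP cs p1 = pvP cs (q1 - 1) ++ [c1] := by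
            rw [← hs1, hP1, if_neg hc1]
          have e2 : pvP ct p2 = pvP ct (q2 - 1) ++ [c2] := by
            rw [← hs2, hP2, if_neg hc2]
          by_cases hne : PySem.List.pyGet? cs q1 ≠ PySem.List.pyGet? ct q2
          · rw [if_pos hne]
            have hcc : ¬ c1 = c2 := by
              intro he; exact hne (by rw [hg1, hg2, he])
            rw [e1, e2]
            symm; rw [beq_eq_false_iff_ne]
            intro he
            have := List.concat_inj.mp (by simpa [List.concat_eq_append] using he)
            exact hcc this.2
          · rw [if_neg hne]
            have hcc : c1 = c2 := by
              have : some c1 = some c2 := by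
                rw [← hg1, ← hg2]; by_contra hne'; exact hne hne'
              exact Option.some.inj this
            rw [ih (q1 - 1) (q2 - 1) (by omega) (by omega) (by omega)]
            rw [e1, e2, hcc]
            by_cases hEq : pvP cs (q1 - 1) = pvP ct (q2 - 1)
            · simp [hEq]
            · have hne2 : ¬ pvP cs (q1 - 1) ++ [c2] = pvP ct (q2 - 1) ++ [c2] := by
                intro he; exact hEq (List.append_cancel_right he)
              simp [beq_eq_false_iff_ne, hEq, hne2]
        · rw [if_neg hq]
          by_cases hq' : (q1 ≥ 0 ∧ q2 < 0) ∨ (q1 < 0 ∧ q2 ≥ 0)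
          · rw [if_pos hq']
            rcases hq' with ⟨ha, hb⟩ | ⟨ha, hb⟩
            · obtain ⟨c1, hg1, hP1⟩ := pvP_take cs q1 ha (by omega)
              have hc1 : ¬ c1 = '#' := by
                rcases hn1 with hn | hn
                · omega
                · intro he; exact hn (by rw [hg1, he])
              have e1 : pvP cs p1 = pvP cs (q1 - 1) ++ [c1] := by
                rw [← hs1, hP1, if_neg hc1]
              have e2 : pvP ct p2 = [] := by rw [← hs2, pvP_neg _ _ hb]
              rw [e1, e2]; simp
            · obtain ⟨c2, hg2, hP2⟩ := pvP_take ct q2 hb (by omega)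
              have hc2 : ¬ c2 = '#' := by
                rcases hn2 with hn | hn
                · omega
                · intro he; exact hn (by rw [hg2, he])
              have e1 : pvP cs p1 = [] := by rw [← hs1, pvP_neg _ _ ha]
              have e2 : pvP ct p2 = pvP ct (q2 - 1) ++ [c2] := by
                rw [← hs2, hP2, if_neg hc2]
              rw [e1, e2]; simp
          · rw [if_neg hq']
            have ha : q1 < 0 := by
              by_contra hc; push_neg at hc
              have hb : q2 < 0 := by by_contra hb; push_neg at hb; exact hq ⟨hc, hb⟩
              exact hq' (Or.inl ⟨hc, hb⟩)
            have hb : q2 < 0 := by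
              by_contra hc; push_neg at hc
              have ha2 : q1 < 0 := by by_contra hd; push_neg at hd; exact hq ⟨hd, hc⟩
              exact hq' (Or.inr ⟨ha2, hc⟩)
            have e1 : pvP cs p1 = [] := by rw [← hs1, pvP_neg _ _ ha]
            have e2 : pvP ct p2 = [] := by rw [← hs2, pvP_neg _ _ hb]
            rw [ih (q1 - 1) (q2 - 1) (by omega) (by omega) (by omega)]
            rw [e1, e2, pvP_neg _ _ (by omega), pvP_neg _ _ (by omega)]
      · rw [if_neg h]
        push_neg at h
        rw [pvP_neg _ _ (by omega), pvP_neg _ _ (by omega)]; rfl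

-- ===== VERDICT (by name: the statement is the Claim_ definition above) =====
theorem is_equal_optimal_spec : Claim_equal_is_equal_optimal := by
  intro s t _
  unfold Spec_is_equal_optimal is_equal_optimal is_equal_optimal_alt
  rw [pvLoopA_spec _ _ _ _ _ (by omega) (by omega) (by omega)]
  have e1 : pvP s.toList ((s.toList.length : Int) - 1) = pvProcB s.toList := by
    have h : ((s.toList.length : Int) - 1 + 1).toNat = s.toList.length := by omega
    rw [pvP, h, List.take_length]
  have e2 : pvP t.toList ((t.toList.length : Int) - 1) = pvProcB t.toList := by
    have h : ((t.toList.length : Int) - 1 + 1).toNat = t.toList.length := by omega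
    rw [pvP, h, List.take_length]
  rw [e1, e2]
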